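-- pv_equiv track=rewrite | github.com/ThomasStokes1998/Projects | Speed Solving Analysis/RubiksCube.py | htm
-- ===== SOURCE A (Python) =====
-- def htm(turns: str) -> list:
--     movelist = []
--     m = ""
--     for t in turns:
--         if t == " ":
--             continue
--         if t in ["'", "2", "w"]:
--                 m += t
--         else:
--             if len(m) > 0:
--                 movelist.append(m)
--             m = t
--     movelist.append(m)
--     return movelist
-- ===== SOURCE B (Python) =====
-- def htm(turns: str) -> list:
--     # mark-and-split: prefix every base character with a space, then split on spaces
--     s = turns.replace(" ", "")
--     return "".join(c if c in "'2w" else " " + c for c in s).lstrip(" ").split(" ")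
-- ===== Notes on version B (the rewrite author's own statement) =====
-- stated objective: idiomatic
-- what changed: Replaces A's character-by-character accumulator/flush loop with a mark-and-split pipeline: remove spaces, prefix every base character with a space, strip the leading space, and split on spaces.
import Mathlib
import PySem

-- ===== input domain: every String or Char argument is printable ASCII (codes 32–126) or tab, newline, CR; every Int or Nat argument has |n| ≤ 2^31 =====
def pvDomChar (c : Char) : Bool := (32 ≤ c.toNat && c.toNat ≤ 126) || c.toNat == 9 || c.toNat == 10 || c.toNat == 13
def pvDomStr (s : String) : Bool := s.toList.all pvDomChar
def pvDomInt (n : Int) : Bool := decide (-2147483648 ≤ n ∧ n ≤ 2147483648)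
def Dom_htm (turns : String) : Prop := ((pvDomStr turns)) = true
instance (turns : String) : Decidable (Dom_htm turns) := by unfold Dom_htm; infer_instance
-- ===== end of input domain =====

-- B (htm_alt) replaces A's accumulator/flush loop by an idiomatic mark-and-split: prefix
-- every base character with a space, then split on spaces (objective: idiomatic; not faster).

-- ===== PORT A =====
-- loop body of A: skip spaces, suffix chars ' 2 w extend the current move m, a base char
-- flushes m (if nonempty) and starts a new move; tokens are List Char, turned into String at the end
def htmStep (st : List (List Char) × List Char) (t : Char) : List (List Char) × List Char :=
  if t = ' ' then st
  else if t = '\'' ∨ t = '2' ∨ t = 'w' then (st.1, st.2 ++ [t])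
  else ((if st.2.length > 0 then st.1 ++ [st.2] else st.1), [t])

def htm (turns : String) : List String :=
  let r := turns.toList.foldl htmStep ([], [])
  (r.1 ++ [r.2]).map String.ofList

-- ===== PORT B =====
-- c if c in "'2w" else " " + c
def htmMark (c : Char) : List Char := if c = '\'' ∨ c = '2' ∨ c = 'w' then [c] else [' ', c]

def htm_alt (turns : String) : List String :=
  let s := turns.toList.filter (fun c => c ≠ ' ')       -- turns.replace(" ", "")
  let marked := s.flatMap htmMark                       -- "".join(c if c in "'2w" else " " + c for c in s)
  -- .lstrip(" ") = drop leading spaces; .split(" ") = List.splitOn ' ' (exact for a one-char separator)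
  ((marked.dropWhile (fun c => c = ' ')).splitOn ' ').map String.ofList

-- ===== PRECONDITION & SPEC =====
def Spec_htm (turns : String) (out : List String) : Prop := out = htm_alt turns
instance (turns : String) (out : List String) : Decidable (Spec_htm turns out) := by unfold Spec_htm; infer_instance

-- ===== CLAIM (what is proved, stated in full; the proofs are below) =====
def Claim_equal_htm : Prop := ∀ (turns : String), Dom_htm turns → Spec_htm turns (htm turns)

-- ===== LEMMAS AND PROOFS =====

-- common recursive characterisation of the token list produced from a space-free list
def tok (m : List Char) : List Char → List (List Char)
  | [] => [m]
  | c :: rest =>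
      if c = '\'' ∨ c = '2' ∨ c = 'w' then tok (m ++ [c]) rest
      else (if m = [] then [] else [m]) ++ tok [c] rest

-- A's loop ignores spaces
theorem foldl_htmStep_filter (cs : List Char) (st : List (List Char) × List Char) :
    cs.foldl htmStep st = (cs.filter (fun c => c ≠ ' ')).foldl htmStep st := by
  induction cs generalizing st with
  | nil => rfl
  | cons c cs ih =>
      by_cases hc : c = ' '
      · simp [hc, htmStep, ih]
      · simp [hc, List.foldl_cons, ih]

-- A's loop over a space-free list computes tok
theorem foldl_htmStep_tok (s : List Char) (ml : List (List Char)) (m : List Char)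
    (hs : ' ' ∉ s) :
    (s.foldl htmStep (ml, m)).1 ++ [(s.foldl htmStep (ml, m)).2] = ml ++ tok m s := by
  induction s generalizing ml m with
  | nil => simp [tok]
  | cons c s ih =>
      have hc : c ≠ ' ' := fun h => hs (h ▸ List.mem_cons_self ..)
      have hs' : ' ' ∉ s := fun h => hs (List.mem_cons_of_mem _ h)
      by_cases hsuf : c = '\'' ∨ c = '2' ∨ c = 'w'
      · simp only [List.foldl_cons, htmStep, if_neg hc, if_pos hsuf, tok, ih _ _ hs']
      · simp only [List.foldl_cons, htmStep, if_neg hc, if_neg hsuf, tok, ih _ _ hs']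
        by_cases hm : m = []
        · simp [hm]
        · simp [hm, List.length_pos_iff.mpr hm]

-- B's split of m ++ marked-s computes tok m s, for a nonempty space-free prefix m
theorem splitOn_marked (s : List Char) (m : List Char)
    (hs : ' ' ∉ s) (hm : m ≠ []) (hmsp : ' ' ∉ m) :
    List.splitOn ' ' (m ++ s.flatMap htmMark) = tok m s := by
  have hnp : ∀ x ∈ m, ¬ ((x == ' ') = true) := fun x hx => by
    simp only [beq_iff_eq]; exact fun h => hmsp (h ▸ hx)
  induction s generalizing m with
  | nil =>
      simp only [List.flatMap_nil, List.append_nil, tok, List.splitOn]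
      exact List.splitOnP_eq_single _ _ hnp
  | cons c s ih =>
      have hc : c ≠ ' ' := fun h => hs (h ▸ List.mem_cons_self ..)
      have hs' : ' ' ∉ s := fun h => hs (List.mem_cons_of_mem _ h)
      by_cases hsuf : c = '\'' ∨ c = '2' ∨ c = 'w'
      · have heq : m ++ (c :: s).flatMap htmMark = (m ++ [c]) ++ s.flatMap htmMark := by
          simp [htmMark, hsuf]
        have hmc : ' ' ∉ m ++ [c] := by
          intro h
          rcases List.mem_append.mp h with h | h
          · exact hmsp h
          · simp only [List.mem_singleton] at h
            exact hc h.symm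
        rw [heq, ih (m ++ [c]) hs' (by simp) hmc (fun x hx => by
          simp only [beq_iff_eq]; exact fun h => hmc (h ▸ hx))]
        simp [tok, hsuf]
      · have heq : m ++ (c :: s).flatMap htmMark = m ++ ' ' :: (c :: s.flatMap htmMark) := by
          simp [htmMark, hsuf]
        have hcsp : ' ' ∉ [c] := by simpa using fun h => hc h.symm
        rw [heq]
        rw [show List.splitOn ' ' (m ++ ' ' :: (c :: s.flatMap htmMark))
              = m :: List.splitOn ' ' (c :: s.flatMap htmMark) from
            List.splitOnP_first _ _ hnp ' ' (by simp) _]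
        rw [show (c :: s.flatMap htmMark) = [c] ++ s.flatMap htmMark from rfl]
        rw [ih [c] hs' (by simp) hcsp (fun x hx => by
          simp only [beq_iff_eq]; exact fun h => hcsp (h ▸ hx))]
        simp [tok, hsuf, hm]

-- B on a space-free list computes tok [] s
theorem splitOn_dropWhile_tok (s : List Char) (hs : ' ' ∉ s) :
    List.splitOn ' ' ((s.flatMap htmMark).dropWhile (fun c => c = ' ')) = tok [] s := by
  cases s with
  | nil => simp [tok]
  | cons c s =>
      have hc : c ≠ ' ' := fun h => hs (h ▸ List.mem_cons_self ..)
      have hs' : ' ' ∉ s := fun h => hs (List.mem_cons_of_mem _ h)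
      have hcsp : ' ' ∉ [c] := by simpa using fun h => hc h.symm
      have hkey : List.splitOn ' ' (c :: s.flatMap htmMark) = tok [c] s := by
        rw [show (c :: s.flatMap htmMark) = [c] ++ s.flatMap htmMark from rfl]
        exact splitOn_marked s [c] hs' (by simp) hcsp
      by_cases hsuf : c = '\'' ∨ c = '2' ∨ c = 'w'
      · have hmark : (c :: s).flatMap htmMark = c :: s.flatMap htmMark := by
          simp [htmMark, hsuf]
        rw [hmark, List.dropWhile_cons_of_neg (by simpa using hc), hkey]
        simp [tok, hsuf]
      · have hmark : (c :: s).flatMap htmMark = ' ' :: (c :: s.flatMap htmMark) := by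
          simp [htmMark, hsuf]
        rw [hmark, List.dropWhile_cons_of_pos (by simp),
          List.dropWhile_cons_of_neg (by simpa using hc), hkey]
        simp [tok, hsuf]

-- ===== VERDICT (by name: the statement is the Claim_ definition above) =====
theorem htm_spec : Claim_equal_htm := by
  intro turns _
  unfold Spec_htm htm htm_alt
  have hmem : ' ' ∉ turns.toList.filter (fun c => c ≠ ' ') := by
    simp [List.mem_filter]
  simp only []
  rw [foldl_htmStep_filter, splitOn_dropWhile_tok _ hmem]
  have := foldl_htmStep_tok (turns.toList.filter (fun c => c ≠ ' ')) [] [] hmem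
  simp only [List.nil_append] at this
  rw [this]
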